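-- pv_equiv track=rewrite | github.com/krzysztof-turowski/string-algorithms | string_indexing/suffix_array.py | _get_category_distance
-- ===== SOURCE A (Python) =====
-- def _get_category_distance(SL, category):
--   i = next(i for i, x in enumerate(SL[1:], 1) if x == category)
--   category_distance, dist_from_last = [-1] + [0] * i, 0
--   while i < len(SL) - 1:
--     if SL[i] == category:
--       dist_from_last = 0
--     dist_from_last, i = dist_from_last + 1, i + 1
--     category_distance.append(dist_from_last)
--   return category_distance
-- ===== SOURCE B (Python) =====
-- def _get_category_distance(SL, category):
--   prev = next(i for i, x in enumerate(SL[1:], 1) if x == category)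
--   result = [-1] + [0] * prev
--   occ = [j for j in range(prev + 1, len(SL)) if SL[j] == category]
--   for nextocc in occ:
--     result.extend(j - prev for j in range(prev + 1, nextocc + 1))
--     prev = nextocc
--   result.extend(j - prev for j in range(prev + 1, len(SL)))
--   return result
-- ===== Notes on version B (the rewrite author's own statement) =====
-- stated objective: alternative
-- what changed: Replaces A's single reset-counter scan with building an explicit table of later occurrence positions and then filling the result segment-by-segment between consecutive occurrences (distances computed as index differences j-prev instead of a running counter).
import Mathlib
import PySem

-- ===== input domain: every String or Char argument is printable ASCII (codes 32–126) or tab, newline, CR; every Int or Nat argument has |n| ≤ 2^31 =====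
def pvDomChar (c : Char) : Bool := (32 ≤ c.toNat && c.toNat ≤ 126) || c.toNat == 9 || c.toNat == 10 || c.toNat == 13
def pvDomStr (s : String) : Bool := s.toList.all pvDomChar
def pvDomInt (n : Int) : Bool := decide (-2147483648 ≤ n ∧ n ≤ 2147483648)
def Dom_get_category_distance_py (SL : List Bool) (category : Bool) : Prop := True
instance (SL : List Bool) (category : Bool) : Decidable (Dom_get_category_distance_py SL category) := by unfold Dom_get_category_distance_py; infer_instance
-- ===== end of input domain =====

-- B replaces A's single reset-counter scan by an occurrence table filled segment-by-segment
-- (an alternative decomposition; same O(n) cost).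

-- ===== PORT A =====
-- next(i for i, x in enumerate(SL[1:], 1) if x == category): first index ≥ 1 with SL[i] = category
-- (none = StopIteration, excluded by Pre_). Shared verbatim by both Pythons' first line.
def findCat : List Bool → Bool → Nat → Option Nat
  | [], _, _ => none
  | x :: xs, c, i => if x = c then some i else findCat xs c (i + 1)

-- the while loop of A; SL.getD i false is exact for SL[i] because the loop guard gives i < len SL
def loopA (SL : List Bool) (c : Bool) (i : Nat) (dist : Int) (acc : List Int) : List Int :=
  if _h : i < SL.length - 1 then
    let d0 : Int := if SL.getD i false = c then 0 else dist
    loopA SL c (i + 1) (d0 + 1) (acc ++ [d0 + 1])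
  else acc
termination_by SL.length - 1 - i

def get_category_distance_py (SL : List Bool) (category : Bool) : List Int :=
  match findCat (SL.drop 1) category 1 with
  | none => []   -- StopIteration in Python; excluded by Pre_
  | some i => loopA SL category i 0 (-1 :: List.replicate i 0)

-- ===== PORT B =====
-- for nextocc in occ: result.extend(j - prev for j in range(prev+1, nextocc+1)); prev = nextocc
def stepB (st : Nat × List Int) (o : Nat) : Nat × List Int :=
  (o, st.2 ++ (List.range' (st.1 + 1) (o - st.1)).map (fun j : Nat => (j : Int) - (st.1 : Int)))

def get_category_distance_py_alt (SL : List Bool) (category : Bool) : List Int :=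
  match findCat (SL.drop 1) category 1 with
  | none => []   -- StopIteration in Python; excluded by Pre_
  | some i0 =>
    let occ := (List.range' (i0 + 1) (SL.length - (i0 + 1))).filter (fun j => SL.getD j false = category)
    let st := occ.foldl stepB (i0, -1 :: List.replicate i0 0)
    st.2 ++ (List.range' (st.1 + 1) (SL.length - 1 - st.1)).map (fun j : Nat => (j : Int) - (st.1 : Int))

-- ===== PRECONDITION & SPEC =====
-- Pre_: the category occurs somewhere in SL[1:]; otherwise the 'next(...)' in both A and B raises StopIteration.
def Pre_get_category_distance_py (SL : List Bool) (category : Bool) : Prop :=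
  category ∈ SL.drop 1
instance (SL : List Bool) (category : Bool) : Decidable (Pre_get_category_distance_py SL category) := by unfold Pre_get_category_distance_py; infer_instance
def pvWitness_get_category_distance_py : List Bool × Bool := ([false, true, false, true, false], true)

def Spec_get_category_distance_py (SL : List Bool) (category : Bool) (out : List Int) : Prop := out = get_category_distance_py_alt SL category
instance (SL : List Bool) (category : Bool) (out : List Int) : Decidable (Spec_get_category_distance_py SL category out) := by unfold Spec_get_category_distance_py; infer_instance

-- ===== CLAIM (what is proved, stated in full; the proofs are below) =====
def Claim_equal_get_category_distance_py : Prop := ∀ (SL : List Bool) (category : Bool), Dom_get_category_distance_py SL category → Pre_get_category_distance_py SL category → Spec_get_category_distance_py SL category (get_category_distance_py SL category)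

-- ===== LEMMAS AND PROOFS =====

-- common reference shape: the tail of the result after position prev (i the current loop index of A)
def specTail (SL : List Bool) (c : Bool) (prev i : Nat) : List Int :=
  if _h : i < SL.length - 1 then
    ((i : Int) + 1 - (if SL.getD i false = c then (i : Int) else (prev : Int))) ::
      specTail SL c (if SL.getD i false = c then i else prev) (i + 1)
  else []
termination_by SL.length - 1 - i

theorem findCat_isSome (l : List Bool) (c : Bool) :
    ∀ i : Nat, c ∈ l → (findCat l c i).isSome := by
  induction l with
  | nil => intro i h; cases h
  | cons x xs ih =>
    intro i h
    rw [findCat]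
    by_cases hx : x = c
    · simp [hx]
    · have : c ∈ xs := by cases h with
        | head => exact absurd rfl hx
        | tail _ h => exact h
      simpa [hx] using ih (i + 1) this

theorem findCat_lt (l : List Bool) (c : Bool) :
    ∀ i j : Nat, findCat l c i = some j → i ≤ j ∧ j < i + l.length := by
  induction l with
  | nil => intro i j h; simp [findCat] at h
  | cons x xs ih =>
    intro i j h
    rw [findCat] at h
    by_cases hx : x = c
    · simp [hx] at h; simp only [List.length_cons]; omega
    · simp only [if_neg hx] at h
      have := ih (i + 1) j h
      simp only [List.length_cons]
      omega

theorem spec_reset (SL : List Bool) (c : Bool) (prev i : Nat) (h : SL.getD i false = c) :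
    specTail SL c prev i = specTail SL c i i := by
  unfold specTail
  rw [h]
  simp

def Ffun (SL : List Bool) : Nat → List Nat → List Int
  | prev, [] => (List.range' (prev + 1) (SL.length - 1 - prev)).map (fun j : Nat => (j : Int) - (prev : Int))
  | prev, o :: os => (List.range' (prev + 1) (o - prev)).map (fun j : Nat => (j : Int) - (prev : Int)) ++ Ffun SL o os

theorem foldl_stepB_eq_Ffun (SL : List Bool) :
    ∀ occ : List Nat, ∀ prev : Nat, ∀ acc : List Int,
      (let st := occ.foldl stepB (prev, acc);
       st.2 ++ (List.range' (st.1 + 1) (SL.length - 1 - st.1)).map (fun j : Nat => (j : Int) - (st.1 : Int)))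
        = acc ++ Ffun SL prev occ := by
  intro occ
  induction occ with
  | nil => intro prev acc; simp [Ffun]
  | cons o os ih =>
    intro prev acc
    simp only [List.foldl_cons, Ffun]
    rw [show List.foldl stepB (stepB (prev, acc) o) os = List.foldl stepB (o, acc ++ (List.range' (prev + 1) (o - prev)).map (fun j : Nat => (j : Int) - (prev : Int))) os from rfl]
    rw [ih]
    simp [List.append_assoc]

theorem loopA_eq_specTail (SL : List Bool) (c : Bool) :
    ∀ i prev : Nat, ∀ acc : List Int,
      loopA SL c i ((i : Int) - (prev : Int)) acc = acc ++ specTail SL c prev i := by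
  suffices h : ∀ n i prev : Nat, ∀ acc : List Int, SL.length - 1 - i = n →
      loopA SL c i ((i : Int) - (prev : Int)) acc = acc ++ specTail SL c prev i by
    intro i prev acc; exact h _ i prev acc rfl
  intro n
  induction n with
  | zero =>
    intro i prev acc h0
    rw [loopA, specTail]
    have hi : ¬ i < SL.length - 1 := by omega
    simp [hi]
  | succ n ih =>
    intro i prev acc h
    rw [loopA, specTail]
    have hi : i < SL.length - 1 := by omega
    rw [dif_pos hi, dif_pos hi]
    by_cases hc : SL.getD i false = c
    · rw [if_pos hc, if_pos hc, if_pos hc]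
      change loopA SL c (i + 1) ((0 : Int) + 1) (acc ++ [(0 : Int) + 1]) = _
      have h1 : (0 : Int) + 1 = ((i + 1 : Nat) : Int) - (i : Nat) := by push_cast; ring
      have h2 : ((i : Int) + 1 - (i : Int)) = (0 : Int) + 1 := by ring
      rw [h1, ih (i + 1) i _ (by omega), h2]
      simp
    · rw [if_neg hc, if_neg hc, if_neg hc]
      change loopA SL c (i + 1) (((i : Int) - (prev : Int)) + 1) (acc ++ [((i : Int) - (prev : Int)) + 1]) = _
      have h1 : ((i : Int) - (prev : Int)) + 1 = ((i + 1 : Nat) : Int) - (prev : Nat) := by push_cast; ring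
      have h2 : ((i : Int) + 1 - (prev : Int)) = ((i : Int) - (prev : Int)) + 1 := by ring
      rw [h1, ih (i + 1) prev _ (by omega), h2]
      simp
      ring

theorem specTail_step (SL : List Bool) (c : Bool) (prev s : Nat)
    (hps : prev + 1 ≤ s) (hs : s - 1 < SL.length - 1)
    (hdead : ∀ k, prev + 1 ≤ k → k < s → ¬ SL.getD k false = c) :
    specTail SL c prev (s - 1) = ((s : Int) - (prev : Int)) :: specTail SL c prev s := by
  rw [specTail, dif_pos hs]
  have hv : ((s - 1 : Nat) : Int) + 1 = (s : Int) := by omega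
  have hs1 : s - 1 + 1 = s := by omega
  by_cases hc : SL.getD (s - 1) false = c
  · have hsp : s - 1 = prev := by
      by_contra hne
      exact hdead (s - 1) (by omega) (by omega) hc
    have hs2 : s = prev + 1 := by omega
    subst hs2
    simp only [Nat.add_sub_cancel] at hc ⊢
    simp
  · rw [if_neg hc, if_neg hc, hv, hs1]

theorem Ffun_filter_eq_specTail (SL : List Bool) (c : Bool) :
    ∀ n s prev : Nat, s + n = SL.length → prev + 1 ≤ s →
      (∀ k, prev + 1 ≤ k → k < s → ¬ SL.getD k false = c) →
      Ffun SL prev ((List.range' s n).filter (fun j => SL.getD j false = c))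
        = (List.range' (prev + 1) (s - 1 - prev)).map (fun j : Nat => (j : Int) - (prev : Int))
            ++ specTail SL c prev (s - 1) := by
  intro n
  induction n with
  | zero =>
    intro s prev hlen hps hdead
    have hspec : specTail SL c prev (s - 1) = [] := by
      rw [specTail, dif_neg (by omega)]
    have hlen2 : SL.length - 1 - prev = s - 1 - prev := by omega
    rw [hspec]
    simp only [List.range'_zero, List.filter_nil, Ffun, List.append_nil, hlen2]
  | succ n ih =>
    intro s prev hlen hps hdead
    have hsplit : (List.range' (prev + 1) (s - prev)).map (fun j : Nat => (j : Int) - (prev : Int))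
        = (List.range' (prev + 1) (s - 1 - prev)).map (fun j : Nat => (j : Int) - (prev : Int))
            ++ [((s : Int) - (prev : Int))] := by
      have h1 : s - prev = (s - 1 - prev) + 1 := by omega
      rw [h1, List.range'_1_concat]
      have h2 : prev + 1 + (s - 1 - prev) = s := by omega
      rw [h2, List.map_append]
      rfl
    have hstep := specTail_step SL c prev s hps (by omega) hdead
    rw [List.range'_succ, List.filter_cons]
    by_cases hc : SL.getD s false = c
    · simp only [hc, decide_true, if_pos]
      show Ffun SL prev (s :: _) = _
      rw [Ffun]
      rw [ih (s + 1) s (by omega) (by omega) (by intro k hk1 hk2; omega)]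
      have h0 : s + 1 - 1 - s = 0 := by omega
      have h1 : s + 1 - 1 = s := by omega
      rw [h0, h1]
      simp only [List.range'_zero, List.map_nil, List.nil_append]
      rw [spec_reset SL c prev s hc] at hstep
      rw [hstep, hsplit]
      simp [List.append_assoc]
    · simp only [hc, decide_false, Bool.false_eq_true, ite_false]
      rw [ih (s + 1) prev (by omega) (by omega)
        (by intro k hk1 hk2
            by_cases hks : k = s
            · subst hks; exact hc
            · exact hdead k hk1 (by omega))]
      have h1 : s + 1 - 1 = s := by omega
      rw [h1, hstep, hsplit]
      simp [List.append_assoc]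

theorem ports_agree (SL : List Bool) (c : Bool) (hpre : c ∈ SL.drop 1) :
    get_category_distance_py SL c = get_category_distance_py_alt SL c := by
  obtain ⟨i0, hfind⟩ := Option.isSome_iff_exists.mp (findCat_isSome (SL.drop 1) c 1 hpre)
  have hb := findCat_lt (SL.drop 1) c 1 i0 hfind
  have hlen : (SL.drop 1).length = SL.length - 1 := by simp
  have hlen2 : 1 ≤ SL.length := by
    cases SL with
    | nil => simp at hpre
    | cons x xs => simp
  unfold get_category_distance_py get_category_distance_py_alt
  rw [hfind]
  show loopA SL c i0 0 (-1 :: List.replicate i0 0) = _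
  have hA := loopA_eq_specTail SL c i0 i0 (-1 :: List.replicate i0 0)
  rw [sub_self] at hA
  rw [hA]
  have hB := foldl_stepB_eq_Ffun SL
    ((List.range' (i0 + 1) (SL.length - (i0 + 1))).filter (fun j => SL.getD j false = c))
    i0 (-1 :: List.replicate i0 0)
  simp only at hB
  show _ = ((((List.range' (i0 + 1) (SL.length - (i0 + 1))).filter
      (fun j => SL.getD j false = c)).foldl stepB (i0, -1 :: List.replicate i0 0)).2 ++ _)
  rw [hB]
  rw [Ffun_filter_eq_specTail SL c (SL.length - (i0 + 1)) (i0 + 1) i0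
    (by omega) (by omega) (by intro k h1 h2; omega)]
  simp

-- ===== VERDICT (by name: the statement is the Claim_ definition above) =====
theorem get_category_distance_py_spec : Claim_equal_get_category_distance_py := by
  intro SL category _ hpre
  unfold Spec_get_category_distance_py
  exact ports_agree SL category hpre
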